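-- pv_equiv track=rewrite | github.com/alexfffff/temporalextraction | lib_parser.py | get_temporal_index
-- ===== SOURCE A (Python) =====
-- def get_temporal_index(words, tags):
--     ret = []
--     temp = None
--     for i, t in enumerate(tags):
--         if t == "B-ARGM-TMP":
--             end = i + 1
--             for j in range(i+1, len(tags)):
--                 if tags[j] == "I-ARGM-TMP":
--                     end = j + 1
--                 else:
--                     break
--             temp = (i,end)
--             ret.append(temp)
--     return ret
-- ===== SOURCE B (Python) =====
-- def get_temporal_index(words, tags):
--     ret = []
--     open_ = False
--     start = 0
--     end = 0
--     for i, t in enumerate(tags):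
--         if t == "B-ARGM-TMP":
--             if open_:
--                 ret.append((start, end))
--             start = i
--             end = i + 1
--             open_ = True
--         elif t == "I-ARGM-TMP":
--             if open_:
--                 end = i + 1
--         else:
--             if open_:
--                 ret.append((start, end))
--             open_ = False
--     if open_:
--         ret.append((start, end))
--     return ret
-- ===== Notes on version B (the rewrite author's own statement) =====
-- stated objective: alternative
-- what changed: Replaced the per-B-tag inner rescan of following I-tags with a single state-machine pass that keeps the currently open span and flushes it on B/other tags and at the end.
import Mathlib
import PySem

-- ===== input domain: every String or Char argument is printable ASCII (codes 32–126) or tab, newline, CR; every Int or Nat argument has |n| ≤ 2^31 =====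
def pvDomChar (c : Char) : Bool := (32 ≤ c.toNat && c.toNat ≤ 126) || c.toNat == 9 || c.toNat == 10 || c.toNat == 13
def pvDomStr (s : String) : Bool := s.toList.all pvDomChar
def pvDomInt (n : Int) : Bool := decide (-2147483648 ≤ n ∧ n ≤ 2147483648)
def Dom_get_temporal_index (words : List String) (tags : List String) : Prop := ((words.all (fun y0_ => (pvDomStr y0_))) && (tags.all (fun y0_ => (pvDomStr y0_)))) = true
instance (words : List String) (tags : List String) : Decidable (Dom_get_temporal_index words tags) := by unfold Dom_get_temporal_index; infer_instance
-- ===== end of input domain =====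

-- B replaces A's per-B-tag inner rescan of the following I-tags by a single
-- state-machine pass that keeps the currently open span (objective: alternative).

-- ===== PORT A =====
-- inner loop: `for j in range(i+1, len(tags)): if tags[j]=="I-ARGM-TMP": end=j+1 else: break`,
-- started with end = j; returns the final `end`.
def aScan (tags : List String) (j : Nat) : Nat :=
  if h : j < tags.length then
    if tags[j] = "I-ARGM-TMP" then aScan tags (j + 1) else j
  else j
termination_by tags.length - j

-- outer loop: `for i, t in enumerate(tags)`, accumulating `ret`.
def aLoop (tags : List String) (i : Nat) (rest : List String) (ret : List (Int × Int)) : List (Int × Int) :=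
  match rest with
  | [] => ret
  | t :: rs =>
      aLoop tags (i + 1) rs
        (if t = "B-ARGM-TMP" then ret ++ [((i : Int), (aScan tags (i + 1) : Int))] else ret)

def get_temporal_index (words : List String) (tags : List String) : List (Int × Int) :=
  aLoop tags 0 tags []

-- ===== PORT B =====
-- single pass: state = (ret, open flag, start, end); flush the open span on B / other tags
-- and once more after the loop.
def bLoop (i : Nat) (rest : List String) (ret : List (Int × Int)) (op : Bool) (s e : Int) : List (Int × Int) :=
  match rest with
  | [] => if op then ret ++ [(s, e)] else ret
  | t :: rs =>
      if t = "B-ARGM-TMP" then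
        bLoop (i + 1) rs (if op then ret ++ [(s, e)] else ret) true (i : Int) ((i : Int) + 1)
      else if t = "I-ARGM-TMP" then
        bLoop (i + 1) rs ret op s (if op then (i : Int) + 1 else e)
      else
        bLoop (i + 1) rs (if op then ret ++ [(s, e)] else ret) false s e

def get_temporal_index_alt (words : List String) (tags : List String) : List (Int × Int) :=
  bLoop 0 tags [] false 0 0

-- ===== PRECONDITION & SPEC =====
def Spec_get_temporal_index (words : List String) (tags : List String) (out : List (Int × Int)) : Prop := out = get_temporal_index_alt words tags
instance (words : List String) (tags : List String) (out : List (Int × Int)) : Decidable (Spec_get_temporal_index words tags out) := by unfold Spec_get_temporal_index; infer_instance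

-- ===== CLAIM (what is proved, stated in full; the proofs are below) =====
def Claim_equal_get_temporal_index : Prop := ∀ (words : List String) (tags : List String), Dom_get_temporal_index words tags → Spec_get_temporal_index words tags (get_temporal_index words tags)

-- ===== LEMMAS AND PROOFS =====

-- length of the leading run of "I-ARGM-TMP" tags
def runI : List String → Nat
  | [] => 0
  | t :: rs => if t = "I-ARGM-TMP" then runI rs + 1 else 0

-- reference result for the suffix `rest` of the tag list starting at absolute index i
def specT (i : Nat) : List String → List (Int × Int)
  | [] => []
  | t :: rs =>
      if t = "B-ARGM-TMP" then ((i : Int), (i : Int) + 1 + (runI rs : Int)) :: specT (i + 1) rs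
      else specT (i + 1) rs

theorem aScan_eq (tags : List String) : ∀ (rest : List String) (j : Nat),
    tags.drop j = rest → aScan tags j = j + runI rest := by
  intro rest
  induction rest with
  | nil =>
      intro j hj
      have hlen : tags.length ≤ j := by
        by_contra h
        have := List.drop_eq_nil_iff.mp hj
        omega
      unfold aScan
      simp [runI, Nat.not_lt.mpr hlen]
  | cons t rs ih =>
      intro j hj
      have h1 : tags[j]? = some t := by
        rw [← List.head?_drop, hj]; rfl
      have hlt : j < tags.length := (List.getElem?_eq_some_iff.mp h1).1
      have hget : tags[j] = t := by
        obtain ⟨_, hg⟩ := List.getElem?_eq_some_iff.mp h1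
        exact hg
      have hdrop : tags.drop (j + 1) = rs := by
        rw [← List.drop_drop, hj]; rfl
      unfold aScan
      by_cases hI : t = "I-ARGM-TMP"
      · simp [hlt, hget, hI, ih (j + 1) hdrop, runI]
        omega
      · simp [hlt, hget, hI, runI]

theorem aLoop_eq (tags : List String) : ∀ (rest : List String) (i : Nat) (ret : List (Int × Int)),
    tags.drop i = rest → aLoop tags i rest ret = ret ++ specT i rest := by
  intro rest
  induction rest with
  | nil => intro i ret _; simp [aLoop, specT]
  | cons t rs ih =>
      intro i ret hdrop
      have hdrop' : tags.drop (i + 1) = rs := by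
        rw [← List.drop_drop, hdrop]; rfl
      have hscan : aScan tags (i + 1) = i + 1 + runI rs := aScan_eq tags rs (i + 1) hdrop'
      unfold aLoop
      by_cases hB : t = "B-ARGM-TMP"
      · rw [ih (i + 1) _ hdrop']
        simp [hB, specT, hscan]
      · rw [ih (i + 1) _ hdrop']
        simp [hB, specT]

theorem bLoop_eq : ∀ (rest : List String) (i : Nat) (ret : List (Int × Int)) (s e : Int),
    (bLoop i rest ret false s e = ret ++ specT i rest) ∧
    (bLoop i rest ret true s (i : Int) = ret ++ (s, (i : Int) + (runI rest : Int)) :: specT i rest) := by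
  intro rest
  induction rest with
  | nil =>
      intro i ret s e
      exact ⟨by simp [bLoop, specT], by simp [bLoop, specT, runI]⟩
  | cons t rs ih =>
      intro i ret s e
      constructor
      · -- closed state
        unfold bLoop
        by_cases hB : t = "B-ARGM-TMP"
        · have h := (ih (i + 1) ret ((i : Int)) ((i : Int) + 1)).2
          push_cast at h
          simp only [hB, ite_true, Bool.false_eq_true, if_false]
          rw [h]
          simp [specT]
        · by_cases hI : t = "I-ARGM-TMP"
          · have h := (ih (i + 1) ret s e).1
            simp [hI, h, specT]
          · have h := (ih (i + 1) ret s e).1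
            simp [hB, hI, h, specT]
      · -- open state, current end = i
        unfold bLoop
        by_cases hB : t = "B-ARGM-TMP"
        · have h := (ih (i + 1) (ret ++ [(s, (i : Int))]) ((i : Int)) ((i : Int) + 1)).2
          push_cast at h
          simp only [hB, ite_true]
          rw [h]
          simp [specT]
        · by_cases hI : t = "I-ARGM-TMP"
          · have h := (ih (i + 1) ret s e).2
            push_cast at h
            rw [if_neg hB, if_pos hI]
            simp only [ite_true]
            rw [h]
            simp [specT, hI, runI]
            ring_nf
          · have h := (ih (i + 1) (ret ++ [(s, (i : Int))]) s ((i : Int))).1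
            simp [hB, hI, h, specT, runI]

-- ===== VERDICT (by name: the statement is the Claim_ definition above) =====
theorem get_temporal_index_spec : Claim_equal_get_temporal_index := by
  intro words tags _
  unfold Spec_get_temporal_index get_temporal_index get_temporal_index_alt
  rw [aLoop_eq tags tags 0 [] (by simp), (bLoop_eq tags 0 [] 0 0).1]
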